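-- pv_equiv track=rewrite | github.com/thinkwork-ai/thinkwork | packages/agentcore-strands/agent-container/container-sources/skill_resolver.py | _ancestor_segments
-- ===== SOURCE A (Python) =====
-- def _ancestor_segments(folder_path: str) -> list[str]:
--     """Return folder prefixes deepest → root.
--
--     ``"expenses/escalation"`` → ``["expenses/escalation", "expenses", ""]``
--     ``"expenses"``           → ``["expenses", ""]``
--     ``""``                    → ``[""]``
--     """
--     if not folder_path:
--         return [""]
--     parts = folder_path.split("/")
--     out: list[str] = []
--     while parts:
--         out.append("/".join(parts))
--         parts.pop()
--     out.append("")
--     return out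
-- ===== SOURCE B (Python) =====
-- def _ancestor_segments(folder_path: str) -> list[str]:
--     if not folder_path:
--         return [""]
--     seps = [i for i, c in enumerate(folder_path) if c == "/"]
--     out = [folder_path]
--     for i in reversed(seps):
--         out.append(folder_path[:i])
--     out.append("")
--     return out
-- ===== Notes on version B (the rewrite author's own statement) =====
-- stated objective: alternative
-- what changed: B replaces A's split-then-repeated-join of a shrinking parts list with a single scan collecting separator positions followed by one prefix slice per ancestor.
import Mathlib
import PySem

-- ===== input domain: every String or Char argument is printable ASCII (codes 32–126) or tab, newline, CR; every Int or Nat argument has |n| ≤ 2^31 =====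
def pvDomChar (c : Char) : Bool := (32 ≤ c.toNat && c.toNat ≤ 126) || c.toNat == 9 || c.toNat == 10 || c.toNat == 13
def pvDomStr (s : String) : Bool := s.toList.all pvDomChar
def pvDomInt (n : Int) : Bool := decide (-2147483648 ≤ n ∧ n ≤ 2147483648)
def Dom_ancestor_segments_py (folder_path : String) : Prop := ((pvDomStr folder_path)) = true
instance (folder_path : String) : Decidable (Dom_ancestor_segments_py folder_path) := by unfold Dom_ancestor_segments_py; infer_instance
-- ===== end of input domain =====

-- B replaces A's split-then-repeated-join of a shrinking parts list by a single scan that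
-- collects separator positions and then takes one prefix slice per ancestor (objective: alternative).

-- ===== PORT A =====
-- the `while parts: out.append("/".join(parts)); parts.pop()` loop, then `out.append("")`
def ancestor_loop_A : List (List Char) → List String → List String
  | [], out => out ++ [""]
  | p :: ps, out =>
      ancestor_loop_A (List.dropLast (p :: ps))
        (out ++ [String.ofList (PySem.Chars.join ['/'] (p :: ps))])
  termination_by parts _ => parts.length
  decreasing_by simp

def ancestor_segments_py (folder_path : String) : List String :=
  if folder_path == "" then [""]
  else ancestor_loop_A (PySem.Chars.splitOn folder_path.toList ['/']) []

-- ===== PORT B =====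
def ancestor_segments_py_alt (folder_path : String) : List String :=
  if folder_path == "" then [""]
  else
    let cs := folder_path.toList
    let seps := ((PySem.List.enumerate cs).filter (fun p => p.2 == '/')).map Prod.fst
    (folder_path ::
      seps.reverse.map (fun i => String.ofList (PySem.List.slice cs none (some i)))) ++ [""]

-- ===== PRECONDITION & SPEC =====
def Spec_ancestor_segments_py (folder_path : String) (out : List String) : Prop := out = ancestor_segments_py_alt folder_path
instance (folder_path : String) (out : List String) : Decidable (Spec_ancestor_segments_py folder_path out) := by unfold Spec_ancestor_segments_py; infer_instance

-- ===== CLAIM (what is proved, stated in full; the proofs are below) =====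
def Claim_equal_ancestor_segments_py : Prop := ∀ (folder_path : String), Dom_ancestor_segments_py folder_path → Spec_ancestor_segments_py folder_path (ancestor_segments_py folder_path)

-- ===== LEMMAS AND PROOFS =====

-- structural reformulation of Python's str.split("/")
def splitSlash : List Char → List (List Char)
  | [] => [[]]
  | c :: cs =>
      if c = '/' then [] :: splitSlash cs
      else
        match splitSlash cs with
        | [] => [[c]]
        | p :: ps => (c :: p) :: ps

theorem splitSlash_ne_nil (cs : List Char) : splitSlash cs ≠ [] := by
  cases cs with
  | nil => simp [splitSlash]
  | cons c cs =>
    simp only [splitSlash]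
    split
    · simp
    · split <;> simp

-- prepend to the head part (how go's `cur` merges into the first piece)
def consFirst (p : List Char) : List (List Char) → List (List Char)
  | [] => [p]
  | q :: rest => (p ++ q) :: rest

theorem go_spec (fuel : Nat) (l cur : List Char) (acc : List (List Char))
    (h : l.length < fuel) :
    PySem.Chars.splitOn.go ['/'] fuel l cur acc
      = acc.reverse ++ consFirst cur.reverse (splitSlash l) := by
  induction fuel generalizing l cur acc with
  | zero => omega
  | succ fuel ih =>
    cases l with
    | nil =>
      simp [PySem.Chars.splitOn.go, splitSlash, consFirst]
    | cons c rest =>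
      simp only [PySem.Chars.splitOn.go]
      by_cases hc : c = '/'
      · have hpre : List.isPrefixOf ['/'] (c :: rest) = true := by
          simp [List.isPrefixOf, hc]
        rw [if_pos hpre]
        rw [ih _ _ _ (by simpa using Nat.lt_of_succ_lt_succ h)]
        simp only [splitSlash, if_pos hc, consFirst]
        cases hs : splitSlash rest with
        | nil => exact absurd hs (splitSlash_ne_nil rest)
        | cons p ps => simp [hs]
      · have hpre : ¬ List.isPrefixOf ['/'] (c :: rest) = true := by
          simp only [List.isPrefixOf, Bool.and_eq_true, beq_iff_eq]
          intro hx
          exact hc hx.1.symm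
        rw [if_neg hpre]
        rw [ih _ _ _ (by simpa using Nat.lt_of_succ_lt_succ h)]
        simp only [splitSlash, if_neg hc]
        cases hs : splitSlash rest with
        | nil => exact absurd hs (splitSlash_ne_nil rest)
        | cons p ps => simp [consFirst]

theorem splitOn_eq_splitSlash (cs : List Char) :
    PySem.Chars.splitOn cs ['/'] = splitSlash cs := by
  unfold PySem.Chars.splitOn
  rw [go_spec _ _ _ _ (by omega)]
  cases hs : splitSlash cs with
  | nil => exact absurd hs (splitSlash_ne_nil cs)
  | cons p ps => simp [consFirst]

-- the sequence of joins A's loop produces, deepest first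
def ajoins : List (List Char) → List (List Char)
  | [] => []
  | p :: ps => PySem.Chars.join ['/'] (p :: ps) :: ajoins (List.dropLast (p :: ps))
  termination_by parts => parts.length
  decreasing_by simp

-- '/'-positions of the string, ascending
def sepIdx : List Char → List Nat
  | [] => []
  | c :: cs => if c = '/' then 0 :: (sepIdx cs).map (· + 1) else (sepIdx cs).map (· + 1)

-- what B computes before wrapping: the full string then each prefix, deepest first
def bcore (cs : List Char) : List (List Char) :=
  cs :: (sepIdx cs).reverse.map (fun n => cs.take n)

theorem join_nil_cons (ps : List (List Char)) (h : ps ≠ []) :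
    PySem.Chars.join ['/'] ([] :: ps) = '/' :: PySem.Chars.join ['/'] ps := by
  cases ps with
  | nil => exact absurd rfl h
  | cons q rest => rw [PySem.Chars.join_cons_cons]; simp

theorem join_cons_head (c : Char) (p : List Char) (ps : List (List Char)) :
    PySem.Chars.join ['/'] ((c :: p) :: ps) = c :: PySem.Chars.join ['/'] (p :: ps) := by
  cases ps with
  | nil => rw [PySem.Chars.join_singleton, PySem.Chars.join_singleton]
  | cons q rest => rw [PySem.Chars.join_cons_cons, PySem.Chars.join_cons_cons]; simp

theorem ajoins_nil_cons : ∀ (n : Nat) (S : List (List Char)), S.length ≤ n → S ≠ [] →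
    ajoins ([] :: S) = (ajoins S).map (fun t => '/' :: t) ++ [[]] := by
  intro n
  induction n with
  | zero => intro S hlen hne; cases S with
    | nil => exact absurd rfl hne
    | cons p ps => simp at hlen
  | succ n ih =>
    intro S hlen hne
    cases S with
    | nil => exact absurd rfl hne
    | cons p ps =>
      cases ps with
      | nil =>
        simp [ajoins, join_nil_cons [p] (by simp), PySem.Chars.join_singleton]
      | cons q qs =>
        rw [ajoins, ajoins]
        rw [join_nil_cons (p :: q :: qs) (by simp)]
        have hdl : List.dropLast ([] :: p :: q :: qs) = [] :: List.dropLast (p :: q :: qs) := by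
          simp [List.dropLast]
        rw [hdl]
        rw [ih (List.dropLast (p :: q :: qs))
              (by simp [List.length_dropLast] at *; omega)
              (by simp [List.dropLast])]
        simp

theorem ajoins_cons_head : ∀ (n : Nat) (p : List Char) (ps : List (List Char)) (c : Char),
    ps.length ≤ n →
    ajoins ((c :: p) :: ps) = (ajoins (p :: ps)).map (fun t => c :: t) := by
  intro n
  induction n with
  | zero =>
    intro p ps c hlen
    cases ps with
    | nil => simp [ajoins, PySem.Chars.join_singleton]
    | cons q qs => simp at hlen
  | succ n ih =>
    intro p ps c hlen
    cases ps with
    | nil => simp [ajoins, PySem.Chars.join_singleton]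
    | cons q qs =>
      rw [ajoins, ajoins]
      rw [join_cons_head]
      have hdl : List.dropLast ((c :: p) :: q :: qs) = (c :: p) :: List.dropLast (q :: qs) := by
        simp [List.dropLast]
      have hdl2 : List.dropLast (p :: q :: qs) = p :: List.dropLast (q :: qs) := by
        simp [List.dropLast]
      rw [hdl, hdl2]
      rw [ih p (List.dropLast (q :: qs)) c (by simp [List.length_dropLast] at *; omega)]
      simp

theorem ajoins_splitSlash (cs : List Char) : ajoins (splitSlash cs) = bcore cs := by
  induction cs with
  | nil => simp [splitSlash, ajoins, bcore, sepIdx, PySem.Chars.join_singleton]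
  | cons c cs ih =>
    by_cases hc : c = '/'
    · rw [splitSlash, if_pos hc]
      rw [ajoins_nil_cons (splitSlash cs).length _ le_rfl (splitSlash_ne_nil cs)]
      rw [ih]
      subst hc
      simp [bcore, sepIdx, List.map_reverse, List.map_map, Function.comp, List.take_succ_cons]
    · rw [splitSlash, if_neg hc]
      cases hs : splitSlash cs with
      | nil => exact absurd hs (splitSlash_ne_nil cs)
      | cons p ps =>
        rw [ajoins_cons_head ps.length p ps c le_rfl]
        rw [← hs, ih]
        simp [bcore, sepIdx, hc, List.map_reverse, List.map_map, Function.comp,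
          List.take_succ_cons]

theorem enumerate_filter (cs : List Char) : ∀ (k : Int),
    (((PySem.List.enumerate cs k).filter (fun p => p.2 == '/')).map Prod.fst)
      = (sepIdx cs).map (fun n : Nat => k + (n : Int)) := by
  induction cs with
  | nil => intro k; simp [PySem.List.enumerate, sepIdx]
  | cons c cs ih =>
    intro k
    rw [PySem.List.enumerate, sepIdx]
    by_cases hc : c = '/'
    · rw [if_pos hc, List.filter_cons, if_pos (by simp [hc]), List.map_cons, ih (k + 1),
        List.map_cons, List.map_map]
      refine congrArg₂ _ (by simp) (List.map_congr_left fun n _ => ?_)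
      simp only [Function.comp]
      push_cast; ring
    · rw [if_neg hc, List.filter_cons, if_neg (by simp [hc]), ih (k + 1), List.map_map]
      refine List.map_congr_left fun n _ => ?_
      simp only [Function.comp]
      push_cast; ring

theorem loopA_spec : ∀ (n : Nat) (parts : List (List Char)) (out : List String),
    parts.length ≤ n →
    ancestor_loop_A parts out = out ++ (ajoins parts).map String.ofList ++ [""] := by
  intro n
  induction n with
  | zero =>
    intro parts out hlen
    cases parts with
    | nil => simp [ancestor_loop_A, ajoins]
    | cons p ps => simp at hlen
  | succ n ih =>
    intro parts out hlen
    cases parts with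
    | nil => simp [ancestor_loop_A, ajoins]
    | cons p ps =>
      rw [ancestor_loop_A, ajoins]
      rw [ih _ _ (by simp [List.length_dropLast] at *; omega)]
      simp

-- ===== VERDICT (by name: the statement is the Claim_ definition above) =====
theorem ancestor_segments_py_spec : Claim_equal_ancestor_segments_py := by
  intro fp _
  unfold Spec_ancestor_segments_py ancestor_segments_py ancestor_segments_py_alt
  by_cases h : fp == ""
  · rw [if_pos h, if_pos h]
  · rw [if_neg h, if_neg h]
    rw [loopA_spec (PySem.Chars.splitOn fp.toList ['/']).length _ _ le_rfl]
    rw [splitOn_eq_splitSlash, ajoins_splitSlash]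
    simp only [enumerate_filter fp.toList 0, bcore, List.map_cons, String.ofList_toList, List.map_reverse, List.map_map,
      zero_add]
    simp only [List.nil_append]
    congr 2
    · refine congrArg _ (List.map_congr_left fun n _ => ?_)
      simp [Function.comp, PySem.List.slice_to_natCast]
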